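-- pv_equiv track=rewrite | github.com/kassiocarvalhojk/ac1_analise_algoritmos | facul.py | distribuicao
-- ===== SOURCE A (Python) =====
-- from math import floor
--
-- def distribuicao(lista):
--     # passo 1, cria os buckets
--     min_valor = min(lista)
--     max_valor = max(lista)
--     qtd_baldes = floor((max_valor - min_valor) / len(lista)) + 1
--     baldes = [ [] for _ in range(qtd_baldes) ]
--
--     # passo 2, distribui os elementos nos buckets
--     for num in lista:
--         baldes[floor((num - min_valor) / len(lista))].append(num)
--     return baldes
-- ===== SOURCE B (Python) =====
-- from math import floor
--
-- def distribuicao(lista):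
--     # Per-bucket filtering: one rescan of the list per bucket index,
--     # instead of A's single scatter pass into preallocated buckets.
--     min_valor = min(lista)
--     max_valor = max(lista)
--     n = len(lista)
--     qtd_baldes = floor((max_valor - min_valor) / n) + 1
--     return [[num for num in lista if floor((num - min_valor) / n) == i]
--             for i in range(qtd_baldes)]
-- ===== Notes on version B (the rewrite author's own statement) =====
-- stated objective: alternative
-- what changed: B builds each bucket independently by rescanning the whole list per bucket index (outer loop over bucket indices, inner filter), replacing A's single distribution pass that mutates a preallocated list of buckets by index.
import Mathlib
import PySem

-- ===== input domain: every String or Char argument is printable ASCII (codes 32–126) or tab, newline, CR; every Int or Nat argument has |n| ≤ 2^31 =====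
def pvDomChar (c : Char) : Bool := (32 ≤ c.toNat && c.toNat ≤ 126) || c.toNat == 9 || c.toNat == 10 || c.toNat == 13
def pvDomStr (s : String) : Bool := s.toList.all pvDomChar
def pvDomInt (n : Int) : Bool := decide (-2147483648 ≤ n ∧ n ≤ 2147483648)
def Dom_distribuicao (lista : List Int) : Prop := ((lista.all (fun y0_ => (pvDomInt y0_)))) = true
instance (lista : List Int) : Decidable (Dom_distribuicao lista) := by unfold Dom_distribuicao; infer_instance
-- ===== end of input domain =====

-- One honest line: B builds each bucket independently by filtering the whole list per
-- bucket index (nested rescans) instead of A's single scatter pass into preallocated buckets.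
-- (floor((a)/n) on the admitted integer range equals exact floor division, ported as PySem.Int.floordiv)

-- ===== PORT A =====
def distribuicao (lista : List Int) : List (List Int) :=
  match PySem.List.min? lista (fun x => x), PySem.List.max? lista (fun x => x) with
  | some min_valor, some max_valor =>
    let n : Int := lista.length
    let qtd_baldes := PySem.Int.floordiv (max_valor - min_valor) n + 1
    let baldes : List (List Int) := (List.range qtd_baldes.toNat).map (fun _ => [])
    -- for num in lista: baldes[floor((num-min)/n)].append(num)  (index always in range, see proof)
    lista.foldl
      (fun b num => b.modify (PySem.Int.floordiv (num - min_valor) n).toNat (fun l => l ++ [num]))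
      baldes
  | _, _ => []  -- Python raises ValueError here; excluded by Pre_

-- ===== PORT B =====
def distribuicao_alt (lista : List Int) : List (List Int) :=
  -- min()/max() raise ValueError on []; those inputs are excluded by Pre_
  (PySem.List.min? lista (fun x => x)).elim [] (fun min_valor =>
    (PySem.List.max? lista (fun x => x)).elim [] (fun max_valor =>
      let n : Int := lista.length
      let qtd_baldes := PySem.Int.floordiv (max_valor - min_valor) n + 1
      -- [[num for num in lista if floor((num-min)/n)==i] for i in range(qtd_baldes)]
      (List.range qtd_baldes.toNat).map (fun i =>
        lista.filter (fun num => PySem.Int.floordiv (num - min_valor) n == Int.ofNat i))))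

-- ===== PRECONDITION & SPEC =====
-- Pre_ excludes only the empty list, where Python's min([]) raises ValueError.
def Pre_distribuicao (lista : List Int) : Prop := lista ≠ []
instance (lista : List Int) : Decidable (Pre_distribuicao lista) := by unfold Pre_distribuicao; infer_instance
def pvWitness_distribuicao : List Int := [5, 1, 9, 3, 1]

def Spec_distribuicao (lista : List Int) (out : List (List Int)) : Prop := out = distribuicao_alt lista
instance (lista : List Int) (out : List (List Int)) : Decidable (Spec_distribuicao lista out) := by unfold Spec_distribuicao; infer_instance

-- ===== CLAIM (what is proved, stated in full; the proofs are below) =====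
def Claim_equal_distribuicao : Prop := ∀ (lista : List Int), Dom_distribuicao lista → Pre_distribuicao lista → Spec_distribuicao lista (distribuicao lista)

-- ===== LEMMAS AND PROOFS =====

theorem distribuicao_scatter_lemma (idx : Int → Nat) (m : Nat) :
    ∀ (xs : List Int) (g : Nat → List Int), (∀ x ∈ xs, idx x < m) →
      xs.foldl (fun b x => b.modify (idx x) (fun l => l ++ [x])) ((List.range m).map g)
        = (List.range m).map (fun i => g i ++ xs.filter (fun x => idx x == i)) := by
  intro xs
  induction xs with
  | nil => intro g _; simp
  | cons x t ih =>
    intro g hb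
    have hmod : ((List.range m).map g).modify (idx x) (fun l => l ++ [x])
        = (List.range m).map (fun i => if i = idx x then g i ++ [x] else g i) := by
      apply List.ext_getElem
      · simp
      · intro j h1 h2
        simp only [List.getElem_modify, List.getElem_map, List.getElem_range] at *
        split_ifs with h h' h'
        · simp [h']
        · omega
        · omega
        · rfl
    rw [List.foldl_cons, hmod, ih _ (fun y hy => hb y (by simp [hy]))]
    apply List.map_congr_left
    intro i hi
    by_cases h : idx x = i
    · subst h; simp
    · have hb' : (idx x == i) = false := by simp [h]
      simp [hb', Ne.symm h]

theorem distribuicao_spec' : ∀ (lista : List Int), Pre_distribuicao lista →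
    distribuicao lista = distribuicao_alt lista := by
  intro lista hpre
  obtain ⟨mn, hmn⟩ : ∃ m, PySem.List.min? lista (fun x => x) = some m := by
    cases h : PySem.List.min? lista (fun x => x) with
    | some m => exact ⟨m, rfl⟩
    | none => exact absurd ((PySem.List.min?_eq_none_iff _ _).mp h) hpre
  obtain ⟨mx, hmx⟩ : ∃ m, PySem.List.max? lista (fun x => x) = some m := by
    cases h : PySem.List.max? lista (fun x => x) with
    | some m => exact ⟨m, rfl⟩
    | none => exact absurd ((PySem.List.max?_eq_none_iff _ _).mp h) hpre
  have hn : 0 < (lista.length : Int) := by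
    have : lista.length ≠ 0 := fun h => hpre (List.length_eq_zero_iff.mp h)
    omega
  have hfd : ∀ a : Int, PySem.Int.floordiv a (lista.length : Int) = a / (lista.length : Int) :=
    fun a => PySem.Int.floordiv_eq_ediv_of_pos hn
  have hmin : ∀ y ∈ lista, mn ≤ y := PySem.List.min?_isMin hmn
  have hmax : ∀ y ∈ lista, y ≤ mx := PySem.List.max?_isMax hmx
  -- each element's bucket index is nonnegative and below the bucket count
  have hidx : ∀ x ∈ lista, 0 ≤ PySem.Int.floordiv (x - mn) (lista.length : Int) ∧
      PySem.Int.floordiv (x - mn) (lista.length : Int)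
        < PySem.Int.floordiv (mx - mn) (lista.length : Int) + 1 := by
    intro x hx
    rw [hfd, hfd]
    refine ⟨Int.ediv_nonneg (by have := hmin x hx; omega) (by omega), ?_⟩
    have h1 : (x - mn) / (lista.length : Int) ≤ (mx - mn) / (lista.length : Int) :=
      Int.ediv_le_ediv hn (by have := hmax x hx; omega)
    omega
  unfold distribuicao distribuicao_alt
  rw [hmn, hmx]
  simp only [Option.elim_some]
  rw [distribuicao_scatter_lemma _ _ lista (fun _ => [])
        (by
          intro x hx
          have h := hidx x hx
          omega)]
  apply List.map_congr_left
  intro i hi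
  simp only [List.nil_append]
  apply List.filter_congr
  intro x hx
  obtain ⟨h0, h1⟩ := hidx x hx
  rw [Bool.eq_iff_iff]
  simp only [beq_iff_eq, Int.ofNat_eq_natCast]
  omega

-- ===== VERDICT (by name: the statement is the Claim_ definition above) =====
theorem distribuicao_spec : Claim_equal_distribuicao := by
  intro lista _ hpre
  exact distribuicao_spec' lista hpre
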